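-- pv_equiv track=rewrite | github.com/IloveNooodles/Inventory-Game | Gadget.py | GadgetCsvParser
-- ===== SOURCE A (Python) =====
-- def GadgetCsvParser(lines): #Memparse bentuk CSV ke dalam bentuk list
--     listReturn = []
--     text = ''
--     idx = 1
--
--     for char in lines:
--         if char == ';' or char == '\n':
--             listReturn.append(text)
--             text = ''
--         elif idx == len(lines):
--             text += char
--             listReturn.append(text)
--         else:
--             text += char
--
--         idx += 1
--
--     return listReturn
-- ===== SOURCE B (Python) =====
-- def GadgetCsvParser(lines):
--     if not lines:
--         return []
--     parts = lines.replace('\n', ';').split(';')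
--     if lines[-1] == ';' or lines[-1] == '\n':
--         parts.pop()
--     return parts
-- ===== Notes on version B (the rewrite author's own statement) =====
-- stated objective: simpler
-- what changed: Replaced the char-by-char accumulator loop with index bookkeeping by normalising newlines to semicolons and one library split call, dropping the trailing empty segment when the string ends in a separator.
import Mathlib
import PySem

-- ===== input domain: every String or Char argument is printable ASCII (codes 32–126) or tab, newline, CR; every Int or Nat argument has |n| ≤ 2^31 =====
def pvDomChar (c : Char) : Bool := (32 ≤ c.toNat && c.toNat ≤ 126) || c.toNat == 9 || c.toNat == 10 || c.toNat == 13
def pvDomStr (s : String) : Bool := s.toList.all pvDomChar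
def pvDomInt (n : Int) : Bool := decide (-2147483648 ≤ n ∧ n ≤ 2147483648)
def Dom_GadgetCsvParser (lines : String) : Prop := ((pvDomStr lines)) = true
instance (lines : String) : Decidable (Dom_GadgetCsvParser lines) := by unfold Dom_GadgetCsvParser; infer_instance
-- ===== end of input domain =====

-- B replaces A's char-by-char accumulator loop (with its idx==len(lines) last-char special case)
-- by a replace+split call, popping the trailing empty segment when the string ends in a separator. Objective: simpler.

-- ===== PORT A =====
-- A iterates over the characters with a 1-based counter idx, appending the pending text on each
-- separator and (via the elif) also appending it at a non-separator last character.
def GadgetCsvParser (lines : String) : List String :=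
  (lines.toList.foldl
    (fun (st : List String × List Char × Nat) c =>
      let (listReturn, text, idx) := st
      if c = ';' ∨ c = '\n' then
        (listReturn ++ [String.ofList text], [], idx + 1)
      else if idx = lines.toList.length then
        (listReturn ++ [String.ofList (text ++ [c])], text ++ [c], idx + 1)
      else
        (listReturn, text ++ [c], idx + 1))
    ([], [], 1)).1

-- ===== PORT B =====
-- Source B: early [] on the empty string; replace('\n',';') then split(';') (the library calls,
-- ported as the corresponding List.map / List.splitOn on the char list); pop the last part
-- if the string ends in a separator.
def GadgetCsvParser_alt (lines : String) : List String :=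
  if lines.toList = [] then []
  else if lines.toList.getLast? = some ';' ∨ lines.toList.getLast? = some '\n' then
    (((lines.toList.map (fun c => if c = '\n' then ';' else c)).splitOn ';').map String.ofList).dropLast
  else
    ((lines.toList.map (fun c => if c = '\n' then ';' else c)).splitOn ';').map String.ofList

-- ===== PRECONDITION & SPEC =====
def Spec_GadgetCsvParser (lines : String) (out : List String) : Prop := out = GadgetCsvParser_alt lines
instance (lines : String) (out : List String) : Decidable (Spec_GadgetCsvParser lines out) := by unfold Spec_GadgetCsvParser; infer_instance

-- ===== CLAIM (what is proved, stated in full; the proofs are below) =====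
def Claim_equal_GadgetCsvParser : Prop := ∀ (lines : String), Dom_GadgetCsvParser lines → Spec_GadgetCsvParser lines (GadgetCsvParser lines)

-- ===== LEMMAS AND PROOFS =====

-- the separator predicate both programs react to
def pvSep (c : Char) : Bool := c = ';' || c = '\n'

-- prepending nothing to the head field changes nothing
theorem pvModNil {α : Type} (l : List (List α)) :
    l.modifyHead (fun x => [] ++ x) = l := by cases l <;> simp

-- modifying the head with the identity changes nothing
theorem pvModId {α : Type} (l : List (List α)) :
    l.modifyHead (fun x => x) = l := by cases l <;> simp

-- recursive reading of A's loop: remaining characters × pending text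
def pvGo : List Char → List Char → List String
  | [], _ => []
  | [c], t => if pvSep c then [String.ofList t] else [String.ofList (t ++ [c])]
  | c :: c' :: cs, t =>
      if pvSep c then String.ofList t :: pvGo (c' :: cs) []
      else pvGo (c' :: cs) (t ++ [c])

-- A's foldl, started at the right index, computes acc ++ pvGo
theorem pvFoldA (n : Nat) (cs : List Char) (acc : List String) (text : List Char) (idx : Nat)
    (h : idx + cs.length = n + 1) :
    (cs.foldl
      (fun (st : List String × List Char × Nat) c =>
        let (listReturn, text, idx) := st
        if c = ';' ∨ c = '\n' then
          (listReturn ++ [String.ofList text], [], idx + 1)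
        else if idx = n then
          (listReturn ++ [String.ofList (text ++ [c])], text ++ [c], idx + 1)
        else
          (listReturn, text ++ [c], idx + 1))
      (acc, text, idx)).1 = acc ++ pvGo cs text := by
  induction cs generalizing acc text idx with
  | nil => simp [pvGo]
  | cons c cs ih =>
    cases cs with
    | nil =>
      have hidx : idx = n := by simpa using h
      by_cases hc : c = ';' ∨ c = '\n'
      · rcases hc with hc | hc <;> simp [List.foldl, pvGo, pvSep, hc]
      · rw [not_or] at hc
        simp [List.foldl, pvGo, pvSep, hc.1, hc.2, hidx]
    | cons c' cs' =>
      have hidx : idx ≠ n := by simp at h; omega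
      by_cases hc : c = ';' ∨ c = '\n'
      · have hs : pvSep c = true := by rcases hc with hc | hc <;> simp [pvSep, hc]
        rw [List.foldl_cons]
        simp only [hc, if_pos]
        rw [ih _ _ _ (by simp at h ⊢; omega)]
        simp [pvGo, hs]
      · rw [not_or] at hc
        have hs : pvSep c = false := by simp [pvSep, hc.1, hc.2]
        rw [List.foldl_cons]
        simp only [hc.1, hc.2, or_self, if_false, hidx]
        rw [ih _ _ _ (by simp at h ⊢; omega)]
        simp [pvGo, hs]

-- mapping '\n' to ';' then splitting on ';' = splitting on pvSep
theorem pvMapSplit (cs : List Char) :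
    (cs.map (fun c => if c = '\n' then ';' else c)).splitOn ';' = cs.splitOnP pvSep := by
  show (cs.map (fun c => if c = '\n' then ';' else c)).splitOnP (· == ';') = cs.splitOnP pvSep
  induction cs with
  | nil => rfl
  | cons c cs ih =>
    by_cases hc : pvSep c = true
    · rcases (by simpa [pvSep] using hc : c = ';' ∨ c = '\n') with hc' | hc' <;>
        simp [List.splitOnP_cons, hc', ih, pvSep]
    · have h1 : ¬ c = ';' := by intro h; simp [pvSep, h] at hc
      have h2 : ¬ c = '\n' := by intro h; simp [pvSep, h] at hc
      simp [List.splitOnP_cons, h1, h2, hc, ih]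

-- pvGo against splitOnP: the pending text is prepended to the first field, and the
-- trailing empty field is dropped exactly when the last char is a separator
theorem pvGoSpec (cs : List Char) (t : List Char) (h : cs ≠ []) :
    pvGo cs t =
      (if pvSep (cs.getLast h) then
        (((cs.splitOnP pvSep).modifyHead (t ++ ·)).map String.ofList).dropLast
      else ((cs.splitOnP pvSep).modifyHead (t ++ ·)).map String.ofList) := by
  induction cs generalizing t with
  | nil => exact absurd rfl h
  | cons c cs ih =>
    cases cs with
    | nil =>
      by_cases hc : pvSep c = true
      · simp [pvGo, hc, List.splitOnP_cons, List.splitOnP_nil, List.getLast]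
      · simp [pvGo, hc, List.splitOnP_cons, List.splitOnP_nil, List.getLast]
    | cons c' cs' =>
      have hne : (c' :: cs') ≠ [] := by simp
      have hmod : ∀ (l : List (List Char)),
          (l.modifyHead (List.cons c)).modifyHead (t ++ ·) =
            l.modifyHead ((t ++ [c]) ++ ·) := by
        intro l; cases l <;> simp
      by_cases hc : pvSep c = true
      · rw [pvGo, if_pos hc, ih [] hne, List.getLast_cons hne]
        conv_rhs => rw [List.splitOnP_cons, if_pos hc]
        by_cases hl : pvSep ((c' :: cs').getLast hne) = true
        · rw [if_pos hl, if_pos hl]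
          rw [List.modifyHead, List.map_cons,
            List.dropLast_cons_of_ne_nil (by
              simp only [ne_eq, List.map_eq_nil_iff]
              exact List.splitOnP_ne_nil _ _)]
          simp [pvModId]
        · rw [if_neg hl, if_neg hl]
          simp [pvModId]
      · rw [pvGo, if_neg (by simp [hc]), ih (t ++ [c]) hne, List.getLast_cons hne]
        conv_rhs => rw [List.splitOnP_cons, if_neg hc, hmod]

-- getLast? through the Bool separator test
theorem pvLastSep (cs : List Char) (h : cs ≠ []) :
    (cs.getLast? = some ';' ∨ cs.getLast? = some '\n') ↔ pvSep (cs.getLast h) = true := by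
  rw [List.getLast?_eq_some_getLast h]
  simp [pvSep]

-- ===== VERDICT (by name: the statement is the Claim_ definition above) =====
theorem GadgetCsvParser_spec : Claim_equal_GadgetCsvParser := by
  intro lines _
  show GadgetCsvParser lines = GadgetCsvParser_alt lines
  unfold GadgetCsvParser GadgetCsvParser_alt
  by_cases h : lines.toList = []
  · simp [h]
  · rw [pvFoldA lines.toList.length lines.toList [] [] 1 (by omega)]
    rw [List.nil_append, pvGoSpec lines.toList [] h, pvMapSplit, if_neg h]
    by_cases hl : pvSep (lines.toList.getLast h) = true
    · rw [if_pos hl, if_pos ((pvLastSep lines.toList h).mpr hl)]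
      rw [pvModNil]
    · rw [if_neg (by simp [hl]),
        if_neg (fun hcon => hl ((pvLastSep lines.toList h).mp hcon))]
      rw [pvModNil]
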